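-- pv_equiv track=rewrite | github.com/Aasthaengg/IBMdataset | Python_codes/p02585/s642950204.py | check
-- ===== SOURCE A (Python) =====
-- def check(cir,num):
--     ans = -10**20
--     l = len(cir)
--     for start in range(l):
--         a = 0
--         for i in range(num):
--             if start+i == l:
--                 start = -i
--             a += cir[start + i]
--             ans = max(ans,a)
--     return ans
-- ===== SOURCE B (Python) =====
-- def check(cir, num):
--     ans = -10**20
--     l = len(cir)
--     if l == 0 or num <= 0:
--         return ans
--     # loop interchange: for each window length k, roll a circular window sum across all starts
--     head = 0  # circular sum of the first k elements
--     for k in range(1, num + 1):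
--         head += cir[(k - 1) % l]
--         w = head  # circular sum of k elements starting at `start`
--         for start in range(l):
--             ans = max(ans, w)
--             w += cir[(start + k) % l] - cir[start]
--     return ans
-- ===== Notes on version B (the rewrite author's own statement) =====
-- stated objective: alternative
-- what changed: B interchanges the loops and replaces A's per-start re-accumulation with index-reset wraparound by, for each window length k, one rolling circular window sum updated in O(1) per start (add entering element mod l, drop leaving element).
import Mathlib
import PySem

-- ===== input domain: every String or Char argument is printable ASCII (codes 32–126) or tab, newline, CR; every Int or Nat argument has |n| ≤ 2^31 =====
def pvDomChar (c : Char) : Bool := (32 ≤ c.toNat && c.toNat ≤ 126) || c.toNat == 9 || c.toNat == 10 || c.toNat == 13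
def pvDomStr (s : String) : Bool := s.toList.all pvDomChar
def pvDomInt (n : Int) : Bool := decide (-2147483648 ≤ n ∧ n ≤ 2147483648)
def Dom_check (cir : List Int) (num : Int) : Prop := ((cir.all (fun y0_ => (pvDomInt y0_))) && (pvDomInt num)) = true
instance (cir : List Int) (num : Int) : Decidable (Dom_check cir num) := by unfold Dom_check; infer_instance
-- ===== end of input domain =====

-- B re-implements A by loop interchange: for each window length k it rolls one circular
-- window sum across all starts, instead of A's per-start re-accumulation with an
-- index-reset wraparound; same O(l*num) cost, different structure (objective: alternative).

-- ===== PORT A =====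
-- literal port of A: nested loops, inner state (start, a, ans); `start` is reset to -i at the wrap
-- (`l` = len(cir) is passed to the loop body instead of being a local name).
-- cir[start+i] is always in range when reached (shown in the proofs), so `.getD 0` is never the default.
def pvStepA (cir : List Int) (l : Int) (s : Int × Int × Int) (i : Int) : Int × Int × Int :=
  let start := if s.1 + i = l then -i else s.1
  let a := s.2.1 + (PySem.List.pyGet? cir (start + i)).getD 0
  (start, a, max s.2.2 a)

def check (cir : List Int) (num : Int) : Int :=
  (PySem.List.pyRange 0 (cir.length : Int) 1).foldl
    (fun ans start =>
      ((PySem.List.pyRange 0 num 1).foldl (pvStepA cir (cir.length : Int)) (start, 0, ans)).2.2)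
    (-(10 ^ 20 : Int))

-- ===== PORT B =====
-- port of Source B; all accesses are cir[j % l] with l > 0 or cir[start] with 0 ≤ start < l,
-- always in range, so `.getD 0` is never the default.
def pvStepB (cir : List Int) (l : Int) (k : Int) (t : Int × Int) (start : Int) : Int × Int :=
  let ans := max t.2 t.1
  let w := t.1 + (PySem.List.pyGet? cir (PySem.Int.mod (start + k) l)).getD 0
               - (PySem.List.pyGet? cir start).getD 0
  (w, ans)

def pvOuterB (cir : List Int) (l : Int) (s : Int × Int) (k : Int) : Int × Int :=
  let head := s.1 + (PySem.List.pyGet? cir (PySem.Int.mod (k - 1) l)).getD 0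
  (head, ((PySem.List.pyRange 0 l 1).foldl (pvStepB cir l k) (head, s.2)).2)

def check_alt (cir : List Int) (num : Int) : Int :=
  if (cir.length : Int) = 0 ∨ num ≤ 0 then -(10 ^ 20 : Int)
  else ((PySem.List.pyRange 1 (num + 1) 1).foldl
          (pvOuterB cir (cir.length : Int)) (0, -(10 ^ 20 : Int))).2

-- ===== PRECONDITION & SPEC =====
def Spec_check (cir : List Int) (num : Int) (out : Int) : Prop := out = check_alt cir num
instance (cir : List Int) (num : Int) (out : Int) : Decidable (Spec_check cir num out) := by unfold Spec_check; infer_instance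

-- ===== CLAIM (what is proved, stated in full; the proofs are below) =====
def Claim_equal_check : Prop := ∀ (cir : List Int) (num : Int), Dom_check cir num → Spec_check cir num (check cir num)

-- ===== LEMMAS AND PROOFS =====

-- cir[j % l]: the j-th element of the infinite circular repetition of cir
def pvC (cir : List Int) (j : Int) : Int :=
  (PySem.List.pyGet? cir (j % (cir.length : Int))).getD 0

-- sum of k consecutive elements of the circular repetition, starting at index j
def pvSum (cir : List Int) (j : Int) (k : Nat) : Int :=
  ∑ t ∈ Finset.range k, pvC cir (j + (t : Int))

-- the first n nonnegative integers, as Ints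
def pvRangeI (n : Nat) : List Int := (List.range n).map (fun t : Nat => (t : Int))

theorem pvRangeI_succ (n : Nat) : pvRangeI (n + 1) = pvRangeI n ++ [(n : Int)] := by
  simp [pvRangeI, List.range_succ]

theorem pvSum_zero (cir : List Int) (j : Int) : pvSum cir j 0 = 0 := by
  simp [pvSum]

theorem pvSum_succ (cir : List Int) (j : Int) (k : Nat) :
    pvSum cir j (k + 1) = pvSum cir j k + pvC cir (j + (k : Int)) := by
  simp [pvSum, Finset.sum_range_succ]

theorem pvSum_shift (cir : List Int) (j : Int) (k : Nat) :
    pvSum cir (j + 1) k = pvSum cir j k + pvC cir (j + (k : Int)) - pvC cir j := by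
  have e1 : pvSum cir j (k + 1) = pvSum cir (j + 1) k + pvC cir j := by
    unfold pvSum
    rw [Finset.sum_range_succ']
    congr 1
    · refine Finset.sum_congr rfl (fun t _ => ?_)
      congr 1; push_cast; ring
    · congr 1; push_cast; ring
  have e2 := pvSum_succ cir j k
  linarith

-- folding max over each inner list in turn is folding max over the concatenation
theorem pvFoldlFlat (g : Int → List Int) (xs : List Int) (a : Int) :
    xs.foldl (fun ans x => List.foldl max ans (g x)) a = List.foldl max a (xs.flatMap g) := by
  induction xs generalizing a with
  | nil => simp
  | cons x xs ih => simp [List.foldl_cons, ih, List.foldl_append]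

theorem pvFoldlCongrMem {α β : Type} (f f' : β → α → β) :
    ∀ (xs : List α) (a : β), (∀ x ∈ xs, ∀ b, f b x = f' b x) →
    xs.foldl f a = xs.foldl f' a := by
  intro xs
  induction xs with
  | nil => intro a h; rfl
  | cons x xs ih =>
    intro a h
    rw [List.foldl_cons, List.foldl_cons, h x (List.mem_cons_self)]
    exact ih _ (fun y hy b => h y (List.mem_cons_of_mem _ hy) b)

-- swapping the two index loops permutes the generated list of values
theorem pvSwapPerm (f : Nat → Nat → Int) (m n : Nat) :
    ((List.range m).flatMap fun j : Nat => (List.range n).map fun i : Nat => f j i).Perm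
      ((List.range n).flatMap fun i : Nat => (List.range m).map fun j : Nat => f j i) := by
  induction m with
  | zero => simp
  | succ m ih =>
    have h1 : ((List.range (m+1)).flatMap fun j : Nat => (List.range n).map fun i : Nat => f j i)
        = ((List.range m).flatMap fun j : Nat => (List.range n).map fun i : Nat => f j i)
          ++ ((List.range n).map fun i : Nat => f m i) := by
      rw [List.range_succ, List.flatMap_append]; simp
    have h2 : ((List.range n).flatMap fun i : Nat => (List.range (m+1)).map fun j : Nat => f j i)
        = (List.range n).flatMap fun i : Nat =>
            (((List.range m).map fun j : Nat => f j i) ++ [f m i]) := by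
      refine List.flatMap_congr ?_ ; intro i _
      rw [List.range_succ]; simp
    rw [h1, h2]
    refine List.Perm.trans (List.Perm.append ih (List.Perm.refl _)) ?_
    refine List.Perm.trans ?_ (List.flatMap_append_perm (List.range n)
      (fun i : Nat => (List.range m).map fun j : Nat => f j i) (fun i : Nat => [f m i]))
    rw [← List.map_eq_flatMap]

-- in-range access is pvC
theorem pvGet_eq_pvC (cir : List Int) (j : Int) (h0 : 0 ≤ j) (h1 : j < (cir.length : Int)) :
    (PySem.List.pyGet? cir j).getD 0 = pvC cir j := by
  unfold pvC
  rw [Int.emod_eq_of_lt h0 h1]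

theorem pvMod_emod (a b : Int) (hb : 0 < b) : PySem.Int.mod a b = a % b :=
  PySem.Int.mod_eq_emod_of_pos hb

-- ===== A side =====

-- inner loop of A: after n steps the accumulator is the circular sum of the first n
-- elements starting at start0, and ans has been maxed with every partial circular sum
theorem pvInnerA (cir : List Int) (hl : 0 < (cir.length : Int)) (n : Nat) :
    ∀ (start0 ans0 : Int), 0 ≤ start0 → start0 < (cir.length : Int) →
    ∃ s : Int, s % (cir.length : Int) = start0 % (cir.length : Int) ∧
      0 ≤ s + n ∧ s + n ≤ (cir.length : Int) ∧
      (pvRangeI n).foldl (pvStepA cir (cir.length : Int)) (start0, 0, ans0)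
        = (s, pvSum cir start0 n,
           List.foldl max ans0 ((List.range n).map fun i : Nat => pvSum cir start0 (i+1))) := by
  set l : Int := (cir.length : Int) with hldef
  induction n with
  | zero =>
    intro start0 ans0 h0 h1
    exact ⟨start0, rfl, by omega, by omega, by simp [pvRangeI, pvSum_zero]⟩
  | succ n ih =>
    intro start0 ans0 h0 h1
    obtain ⟨s, hmod, hge, hle, heq⟩ := ih start0 ans0 h0 h1
    rw [pvRangeI_succ, List.foldl_append, heq]
    set s' : Int := if s + (n : Int) = l then -(n : Int) else s with hs'
    have hmod2 : (start0 + (n : Int)) % l = (s + (n : Int)) % l := by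
      rw [Int.add_emod, Int.add_emod s, hmod]
    have hidx : s' + (n : Int) = (start0 + (n : Int)) % l := by
      by_cases h : s + (n : Int) = l
      · simp only [hs', if_pos h]
        rw [hmod2, h, Int.emod_self]; ring
      · simp only [hs', if_neg h]
        rw [hmod2, Int.emod_eq_of_lt hge (by omega)]
    have hidx0 : 0 ≤ s' + (n : Int) := by rw [hidx]; exact Int.emod_nonneg _ (by omega)
    have hidx1 : s' + (n : Int) < l := by rw [hidx]; exact Int.emod_lt_of_pos _ hl
    refine ⟨s', ?_, by push_cast; omega, by push_cast; omega, ?_⟩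
    · by_cases h : s + (n : Int) = l
      · simp only [hs', if_pos h]
        have hsub : -(n : Int) = s - l := by omega
        rw [hsub, Int.sub_emod_right, hmod]
      · simp only [hs', if_neg h]; exact hmod
    · simp only [List.foldl_cons, List.foldl_nil, pvStepA, ← hs']
      have hacc : pvSum cir start0 n + (PySem.List.pyGet? cir (s' + (n : Int))).getD 0
          = pvSum cir start0 (n + 1) := by
        rw [pvSum_succ, hidx]
        congr 1
      rw [List.range_succ, List.map_append, List.foldl_append]
      simp [hacc]

-- the whole of A, for a nonempty list: fold max over all (start, length) circular sums
theorem pvCheckA (cir : List Int) (num : Int) (hl : 0 < (cir.length : Int)) :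
    check cir num = List.foldl max (-(10 ^ 20 : Int))
      ((List.range cir.length).flatMap fun j : Nat =>
        (List.range num.toNat).map fun i : Nat => pvSum cir (j : Int) (i+1)) := by
  set l : Int := (cir.length : Int) with hldef
  have hrange : PySem.List.pyRange 0 l 1 = pvRangeI cir.length := by
    rw [PySem.List.pyRange_one]
    simp [hldef, pvRangeI]
  have hrange2 : PySem.List.pyRange 0 num 1 = pvRangeI num.toNat := by
    rw [PySem.List.pyRange_one]
    simp [pvRangeI]
  unfold check
  rw [← hldef, hrange, hrange2]
  have hstep : ∀ x ∈ pvRangeI cir.length, ∀ ans : Int,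
      ((pvRangeI num.toNat).foldl (pvStepA cir l) (x, 0, ans)).2.2
        = List.foldl max ans ((List.range num.toNat).map fun i : Nat => pvSum cir x (i+1)) := by
    intro x hx ans
    simp only [pvRangeI, List.mem_map, List.mem_range] at hx
    obtain ⟨j, hj, rfl⟩ := hx
    obtain ⟨s, _, _, _, heq⟩ := pvInnerA cir hl num.toNat (j : Int) ans
      (by positivity) (by exact_mod_cast hj)
    rw [heq]
  rw [pvFoldlCongrMem _ _ _ _ hstep]
  rw [pvFoldlFlat (fun x => (List.range num.toNat).map fun i : Nat => pvSum cir x (i+1))]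
  simp only [pvRangeI, List.flatMap_map]

-- ===== B side =====

-- inner loop of B: rolls the window sum of length k across starts 0..m-1
theorem pvInnerB (cir : List Int) (hl : 0 < (cir.length : Int)) (kN : Nat) (m : Nat)
    (hm : m ≤ cir.length) : ∀ (ans0 : Int),
    (pvRangeI m).foldl (pvStepB cir (cir.length : Int) (kN : Int)) (pvSum cir 0 kN, ans0)
      = (pvSum cir (m : Int) kN,
         List.foldl max ans0 ((List.range m).map fun j : Nat => pvSum cir (j : Int) kN)) := by
  set l : Int := (cir.length : Int) with hldef
  induction m with
  | zero => intro ans0; simp [pvRangeI]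
  | succ m ih =>
    intro ans0
    have hm' : m ≤ cir.length := by omega
    rw [pvRangeI_succ, List.foldl_append, ih hm']
    rw [List.range_succ, List.map_append]
    simp only [List.foldl_append, List.map_cons, List.map_nil,
      List.foldl_cons, List.foldl_nil]
    unfold pvStepB
    have hmlt : (m : Int) < l := by
      rw [hldef]; exact_mod_cast (by omega : m < cir.length)
    have hroll : pvSum cir (m : Int) kN
          + (PySem.List.pyGet? cir (PySem.Int.mod ((m : Int) + (kN : Int)) l)).getD 0
          - (PySem.List.pyGet? cir (m : Int)).getD 0
        = pvSum cir ((m : Int) + 1) kN := by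
      rw [pvMod_emod _ _ hl]
      have h1 : (PySem.List.pyGet? cir (((m : Int) + (kN : Int)) % l)).getD 0
          = pvC cir ((m : Int) + (kN : Int)) := by
        rw [hldef]; rfl
      have h2 : (PySem.List.pyGet? cir (m : Int)).getD 0 = pvC cir (m : Int) :=
        pvGet_eq_pvC cir _ (by positivity) hmlt
      rw [h1, h2, pvSum_shift]
    have hc : ((m + 1 : Nat) : Int) = (m : Int) + 1 := by push_cast; ring
    rw [hc]
    rw [hroll]

-- the whole of B, for a nonempty list and positive num
theorem pvCheckB (cir : List Int) (num : Int) (hl : 0 < (cir.length : Int)) (hn : 0 < num) :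
    check_alt cir num = List.foldl max (-(10 ^ 20 : Int))
      ((List.range num.toNat).flatMap fun i : Nat =>
        (List.range cir.length).map fun j : Nat => pvSum cir (j : Int) (i+1)) := by
  set l : Int := (cir.length : Int) with hldef
  have hguard : ¬ ((cir.length : Int) = 0 ∨ num ≤ 0) := by omega
  unfold check_alt
  rw [if_neg hguard, ← hldef]
  have hrange : PySem.List.pyRange 1 (num + 1) 1
      = (List.range num.toNat).map (fun t : Nat => (1 : Int) + (t : Int)) := by
    rw [PySem.List.pyRange_one]
    simp
  rw [hrange]
  -- outer loop invariant: after i steps, head = pvSum cir 0 i; ans = fold over first i lengths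
  suffices h : ∀ (Mn : Nat) (a0 : Int),
      ((List.range Mn).map (fun t : Nat => (1 : Int) + (t : Int))).foldl
          (pvOuterB cir l) (pvSum cir 0 0, a0)
        = (pvSum cir 0 Mn, List.foldl max a0
            ((List.range Mn).flatMap fun i : Nat =>
              (List.range cir.length).map fun j : Nat => pvSum cir (j : Int) (i+1))) by
    have h2 := h num.toNat (-(10 ^ 20 : Int))
    rw [pvSum_zero] at h2
    rw [h2]
  intro Mn a0
  induction Mn with
  | zero => simp [pvSum_zero]
  | succ Mn ih =>
    rw [List.range_succ, List.map_append, List.foldl_append, ih]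
    simp only [List.map_cons, List.map_nil, List.foldl_cons, List.foldl_nil]
    unfold pvOuterB
    have hhead : pvSum cir 0 Mn
        + (PySem.List.pyGet? cir (PySem.Int.mod ((1 : Int) + (Mn : Int) - 1) l)).getD 0
        = pvSum cir 0 (Mn + 1) := by
      rw [pvMod_emod _ _ hl, pvSum_succ]
      have he : (1 : Int) + (Mn : Int) - 1 = (0 : Int) + (Mn : Int) := by ring
      rw [he]
      congr 1
    simp only [hhead]
    have hrange0 : PySem.List.pyRange 0 l 1 = pvRangeI cir.length := by
      rw [PySem.List.pyRange_one]
      simp [hldef, pvRangeI]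
    have hk : ((1 : Int) + (Mn : Int)) = ((Mn + 1 : Nat) : Int) := by push_cast; ring
    rw [hrange0, hk, pvInnerB cir hl (Mn + 1) cir.length le_rfl]
    simp only [List.flatMap_append, List.foldl_append, List.flatMap_cons, List.flatMap_nil,
      List.append_nil]

-- num ≤ 0: both inner loops vanish
theorem pvCheckA_nonpos (cir : List Int) (num : Int) (hn : num ≤ 0) :
    check cir num = -(10 ^ 20 : Int) := by
  unfold check
  rw [PySem.List.pyRange_one_eq_nil (by omega : num ≤ 0)]
  simp only [List.foldl_nil]
  exact List.foldl_fixed' (fun b => rfl) _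

-- ===== VERDICT (by name: the statement is the Claim_ definition above) =====
theorem check_spec : Claim_equal_check := by
  intro cir num _
  unfold Spec_check
  by_cases hl : cir.length = 0
  · unfold check check_alt
    rw [hl]
    simp [PySem.List.pyRange_zero]
  · by_cases hn : num ≤ 0
    · rw [pvCheckA_nonpos cir num hn]
      unfold check_alt
      rw [if_pos (by omega)]
    · have hl' : 0 < (cir.length : Int) := by exact_mod_cast Nat.pos_of_ne_zero hl
      rw [pvCheckA cir num hl', pvCheckB cir num hl' (by omega)]
      exact List.Perm.foldl_eq
        (pvSwapPerm (fun j i => pvSum cir (j : Int) (i+1)) cir.length num.toNat) _
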